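-- pv_equiv track=rewrite | github.com/adaniefei/AccessMath_Pose | AccessMath/speaker/actions/video_segmenter.py | find_action_intervals
-- ===== SOURCE A (Python) =====
-- def find_action_intervals(actions, action_name):
--     int_start = None
--     pos = 0
--     intervals = []
--     # check the array ..
--     while pos < len(actions):
--         if actions[pos] == action_name:
--             # action found ... check if first
--             if int_start is None:
--                 # record interval start ...
--                 int_start = pos
--         else:
--             # different action ... check if an interval was being processed
--             if int_start is not None:
--                 # the interval finished in the last element
--                 intervals.append((int_start, pos - 1))
--                 int_start = None
--
--         pos += 1
--
--     # in case an interval finishes at the end of the actions array ...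
--     if int_start is not None:
--         intervals.append((int_start, pos - 1))
--
--     return intervals
-- ===== SOURCE B (Python) =====
-- def find_action_intervals(actions, action_name):
--     # run-length scan: two pointers skip a whole run of equal values at a time
--     intervals = []
--     n = len(actions)
--     i = 0
--     while i < n:
--         j = i
--         while j < n and actions[j] == actions[i]:
--             j += 1
--         if actions[i] == action_name:
--             intervals.append((i, j - 1))
--         i = j
--     return intervals
-- ===== Notes on version B (the rewrite author's own statement) =====
-- stated objective: alternative
-- what changed: Replaced A's element-by-element sentinel state machine (int_start flag plus a post-loop flush) with a two-pointer run-length scan that consumes each maximal run of equal values at once and emits the interval directly when the run's value matches.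
import Mathlib
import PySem

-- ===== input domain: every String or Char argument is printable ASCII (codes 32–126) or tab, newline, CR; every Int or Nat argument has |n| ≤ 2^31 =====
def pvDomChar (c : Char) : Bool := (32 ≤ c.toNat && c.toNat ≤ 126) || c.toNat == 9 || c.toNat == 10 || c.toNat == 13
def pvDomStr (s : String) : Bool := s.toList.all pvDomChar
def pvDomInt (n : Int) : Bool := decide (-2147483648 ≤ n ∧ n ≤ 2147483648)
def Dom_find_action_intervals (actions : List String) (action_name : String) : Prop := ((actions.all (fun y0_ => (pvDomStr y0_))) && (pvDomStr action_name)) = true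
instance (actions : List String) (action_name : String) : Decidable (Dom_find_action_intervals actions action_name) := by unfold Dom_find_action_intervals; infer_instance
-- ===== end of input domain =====

-- B replaces A's sentinel state machine with a two-pointer run-length scan (alternative decomposition, same O(n) cost).

-- ===== PORT A =====
-- A's while loop: state = (int_start : Option Int, intervals); pos advances by one each step.
def findA_loop (name : String) : List String → Int → Option Int → List (Int × Int) → Option Int × List (Int × Int)
  | [], _, st, acc => (st, acc)
  | a :: rest, pos, st, acc =>
    if a == name then
      match st with
      | none => findA_loop name rest (pos + 1) (some pos) acc
      | some s => findA_loop name rest (pos + 1) (some s) acc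
    else
      match st with
      | some s => findA_loop name rest (pos + 1) none (acc ++ [(s, pos - 1)])
      | none => findA_loop name rest (pos + 1) none acc

def find_action_intervals (actions : List String) (action_name : String) : List (Int × Int) :=
  match findA_loop action_name actions 0 none [] with
  | (some s, acc) => acc ++ [(s, (actions.length : Int) - 1)]
  | (none, acc) => acc

-- ===== PORT B =====
-- B's outer loop: i points at the start of a run; the inner j-scan is the takeWhile/dropWhile split.
def findB_loop (name : String) : List String → Int → List (Int × Int)
  | [], _ => []
  | a :: rest, off =>
    let run := rest.takeWhile (· == a)
    let tail := rest.dropWhile (· == a)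
    let len : Int := 1 + run.length
    (if a == name then [(off, off + len - 1)] else []) ++ findB_loop name tail (off + len)
termination_by l => l.length
decreasing_by
  simp only [List.length_cons]
  exact Nat.lt_succ_of_le (List.length_dropWhile_le _ _)

def find_action_intervals_alt (actions : List String) (action_name : String) : List (Int × Int) :=
  findB_loop action_name actions 0

-- ===== PRECONDITION & SPEC =====
def Spec_find_action_intervals (actions : List String) (action_name : String) (out : List (Int × Int)) : Prop := out = find_action_intervals_alt actions action_name
instance (actions : List String) (action_name : String) (out : List (Int × Int)) : Decidable (Spec_find_action_intervals actions action_name out) := by unfold Spec_find_action_intervals; infer_instance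

-- ===== CLAIM (what is proved, stated in full; the proofs are below) =====
def Claim_equal_find_action_intervals : Prop := ∀ (actions : List String) (action_name : String), Dom_find_action_intervals actions action_name → Spec_find_action_intervals actions action_name (find_action_intervals actions action_name)

-- ===== LEMMAS AND PROOFS =====

-- closing A's loop state at total index `tot` (the post-loop flush)
def finishA (tot : Int) : Option Int × List (Int × Int) → List (Int × Int)
  | (some s, acc) => acc ++ [(s, tot - 1)]
  | (none, acc) => acc

-- skipping a non-matching element one at a time equals consuming its whole run
theorem findB_skip (name a : String) (rest : List String) (pos : Int) (h : (a == name) = false) :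
    findB_loop name (a :: rest) pos = findB_loop name rest (pos + 1) := by
  cases rest with
  | nil => simp [findB_loop, h]
  | cons b rest' =>
    by_cases hb : (b == a) = true
    · have hba : b = a := eq_of_beq hb
      subst hba
      simp only [findB_loop, h, List.takeWhile_cons, List.dropWhile_cons, BEq.rfl, if_true,
        Bool.false_eq_true, if_false, List.length_cons, List.nil_append]
      congr 1
      push_cast; ring
    · have hb' : (b == a) = false := by simpa using hb
      simp only [findB_loop, h, List.takeWhile_cons, List.dropWhile_cons, hb',
        Bool.false_eq_true, if_false, List.length_nil, List.nil_append]
      push_cast; ring_nf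

theorem loop_equiv (name : String) (l : List String) :
    (∀ (pos : Int) (acc : List (Int × Int)),
        finishA (pos + l.length) (findA_loop name l pos none acc) = acc ++ findB_loop name l pos) ∧
    (∀ (pos s : Int) (acc : List (Int × Int)),
        finishA (pos + l.length) (findA_loop name l pos (some s) acc) =
          (acc ++ [(s, pos + ((l.takeWhile (· == name)).length : Int) - 1)]) ++
            findB_loop name (l.dropWhile (· == name)) (pos + (l.takeWhile (· == name)).length)) := by
  induction l with
  | nil =>
    constructor
    · intro pos acc; simp [findA_loop, findB_loop, finishA]
    · intro pos s acc; simp [findA_loop, findB_loop, finishA]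
  | cons a rest ih =>
    obtain ⟨ihn, ihs⟩ := ih
    have harith : ∀ pos : Int, pos + (((a :: rest).length : Nat) : Int) = (pos + 1) + (rest.length : Int) := by
      intro pos; simp [List.length_cons]; ring
    constructor
    · intro pos acc
      by_cases h : (a == name) = true
      · have ha : a = name := eq_of_beq h
        rw [findA_loop]
        simp only [h, if_true]
        rw [harith, ihs (pos + 1) pos acc]
        have ht : rest.takeWhile (· == a) = rest.takeWhile (· == name) := by subst ha; rfl
        have hd : rest.dropWhile (· == a) = rest.dropWhile (· == name) := by subst ha; rfl
        rw [findB_loop]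
        simp only [h, if_true, ht, hd]
        have e1 : pos + 1 + (((rest.takeWhile (· == name)).length : Nat) : Int) - 1
            = pos + (1 + (((rest.takeWhile (· == name)).length : Nat) : Int)) - 1 := by ring
        have e2 : pos + 1 + (((rest.takeWhile (· == name)).length : Nat) : Int)
            = pos + (1 + (((rest.takeWhile (· == name)).length : Nat) : Int)) := by ring
        rw [e1, e2]
        simp
      · have h' : (a == name) = false := by simpa using h
        rw [findA_loop]
        rw [if_neg (by simp [h'])]
        rw [harith, ihn (pos + 1) acc, findB_skip name a rest pos h']
    · intro pos s acc
      by_cases h : (a == name) = true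
      · have ha : a = name := eq_of_beq h
        rw [findA_loop]
        simp only [h, if_true]
        rw [harith, ihs (pos + 1) s acc]
        have htw : (a :: rest).takeWhile (· == name) = a :: rest.takeWhile (· == name) := by
          simp [h]
        have hdw : (a :: rest).dropWhile (· == name) = rest.dropWhile (· == name) := by
          simp [h]
        rw [htw, hdw]
        simp only [List.length_cons]
        have e : pos + 1 + (((rest.takeWhile (· == name)).length : Nat) : Int)
            = pos + ((((rest.takeWhile (· == name)).length + 1 : Nat)) : Int) := by push_cast; ring
        rw [e]
      · have h' : (a == name) = false := by simpa using h
        rw [findA_loop]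
        rw [if_neg (by simp [h'])]
        rw [harith, ihn (pos + 1) (acc ++ [(s, pos - 1)])]
        have htw : (a :: rest).takeWhile (· == name) = [] := by
          simp [h']
        have hdw : (a :: rest).dropWhile (· == name) = a :: rest := by
          simp [h']
        rw [htw, hdw]
        simp only [List.length_nil, Nat.cast_zero, add_zero]
        rw [findB_skip name a rest pos h']

-- ===== VERDICT (by name: the statement is the Claim_ definition above) =====
theorem find_action_intervals_spec : Claim_equal_find_action_intervals := by
  intro actions action_name _
  unfold Spec_find_action_intervals find_action_intervals find_action_intervals_alt
  have h := (loop_equiv action_name actions).1 0 []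
  simp only [zero_add] at h
  rw [List.nil_append] at h
  rw [← h]
  cases hfa : findA_loop action_name actions 0 none [] with
  | mk st acc => cases st <;> simp [finishA]
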